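-- pv_equiv track=rewrite | github.com/schmidtfrk/master-thesis-scripts | bsm_lib.py | span_generator_mod2
-- ===== SOURCE A (Python) =====
-- import itertools
--
-- def span_generator_mod2(liste):
--     """ Takes a list of vectors and returns all linearcombinations(modulo 2)
--
--         Input:
--         liste: list of lists of numbers
--
--         Output:
--         generator of Lists of numbers
--     """
--     if liste==[]:
--         return liste
--     n = len(liste[0])
--     transpose = list(zip(*liste))
--     coefficients = itertools.product(range(2), repeat=len(liste))
--     for coeff in coefficients:
--         yield [sum((a * c) for a, c in zip(transpose[i], coeff)) % 2 for i in range(n)]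
-- ===== SOURCE B (Python) =====
-- def span_generator_mod2(liste):
--     """Same result as A: yields all mod-2 linear combinations of the input
--     vectors, in itertools.product coefficient order, by incremental doubling
--     (each new vector doubles the set of combinations) instead of recomputing
--     every combination from scratch."""
--     if liste == []:
--         return liste
--     n = len(liste[0])
--     combos = [[0] * n]
--     for v in reversed(liste):
--         combos += [[(r[i] + v[i]) % 2 for i in range(n)] for r in combos]
--     for c in combos:
--         yield c
-- ===== Notes on version B (the rewrite author's own statement) =====
-- stated objective: faster
-- what changed: Instead of recomputing each of the 2^k combinations from scratch with a k-term dot product per coordinate, B doubles a list of already-reduced combinations once per input vector (one mod-2 vector addition per new combination), yielding the same sequence in product order.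
import Mathlib
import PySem

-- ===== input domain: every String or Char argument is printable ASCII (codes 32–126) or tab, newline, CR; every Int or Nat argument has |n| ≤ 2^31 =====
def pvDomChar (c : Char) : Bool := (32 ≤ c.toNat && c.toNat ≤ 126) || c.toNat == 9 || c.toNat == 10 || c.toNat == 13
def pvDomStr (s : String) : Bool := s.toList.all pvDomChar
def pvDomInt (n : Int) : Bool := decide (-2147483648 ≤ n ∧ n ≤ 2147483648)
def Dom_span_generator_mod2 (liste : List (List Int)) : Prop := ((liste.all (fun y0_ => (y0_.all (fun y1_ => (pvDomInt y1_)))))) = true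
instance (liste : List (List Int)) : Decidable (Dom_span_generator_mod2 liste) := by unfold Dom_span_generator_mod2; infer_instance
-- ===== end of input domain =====

-- B replaces A's per-combination k-term dot products by incremental doubling with
-- mod-2 vector addition (objective: faster; proved equal on Pre_; A is a
-- generator in Python — the equivalence is about the sequence of yielded values).

-- ===== PORT A =====
-- transpose = list(zip(*liste)) : rows truncated to the minimum row length
def pyTranspose (liste : List (List Int)) : List (List Int) :=
  let m := liste.foldl (fun acc r => min acc r.length) (liste.headD []).length
  (List.range m).map (fun i => liste.map (fun row => row.getD i 0))

-- sum(a*c for a, c in zip(xs, cs))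
def sumProd : List Int → List Int → Int
  | a :: as_, c :: cs => a * c + sumProd as_ cs
  | _, _ => 0

-- itertools.product(range(2), repeat=k), first coordinate slowest
def pyProduct2 : Nat → List (List Int)
  | 0 => [[]]
  | k + 1 => (pyProduct2 k).map (fun t => 0 :: t) ++ (pyProduct2 k).map (fun t => 1 :: t)

def span_generator_mod2 (liste : List (List Int)) : List (List Int) :=
  if liste = [] then [] else
    let n := (liste.headD []).length
    let transpose := pyTranspose liste
    (pyProduct2 liste.length).map (fun coeff =>
      (List.range n).map (fun i => PySem.Int.mod (sumProd (transpose.getD i []) coeff) 2))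

-- ===== PORT B =====
-- [(r[i] + v[i]) % 2 for i in range(n)]  (getD is exact: Pre_ keeps every index in range)
def xorRow (n : Nat) (v r : List Int) : List Int :=
  (List.range n).map (fun i => PySem.Int.mod (r.getD i 0 + v.getD i 0) 2)

def span_generator_mod2_alt (liste : List (List Int)) : List (List Int) :=
  match liste with
  | [] => []
  | first :: _ =>
    let n := first.length
    liste.reverse.foldl (fun combos v => combos ++ combos.map (fun r => xorRow n v r))
      [List.replicate n 0]

-- ===== PRECONDITION & SPEC =====
-- Pre_ excludes exactly the inputs on which A raises IndexError: some row shorter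
-- than the first row (then zip truncates the transpose and transpose[i] is missing).
def Pre_span_generator_mod2 (liste : List (List Int)) : Prop :=
  ∀ row ∈ liste, (liste.headD []).length ≤ row.length
instance (liste : List (List Int)) : Decidable (Pre_span_generator_mod2 liste) := by
  unfold Pre_span_generator_mod2; infer_instance

def pvWitness_span_generator_mod2 : List (List Int) := [[1, 0], [0, 1]]

def Spec_span_generator_mod2 (liste : List (List Int)) (out : List (List Int)) : Prop :=
  out = span_generator_mod2_alt liste
instance (liste : List (List Int)) (out : List (List Int)) : Decidable (Spec_span_generator_mod2 liste out) := by
  unfold Spec_span_generator_mod2; infer_instance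

-- ===== CLAIM (what is proved, stated in full; the proofs are below) =====
def Claim_equal_span_generator_mod2 : Prop := ∀ (liste : List (List Int)), Dom_span_generator_mod2 liste → Pre_span_generator_mod2 liste → Spec_span_generator_mod2 liste (span_generator_mod2 liste)

-- ===== LEMMAS AND PROOFS =====

-- the common reference value: combination of `rows` with coefficients `c`, coordinatewise mod 2
def refVal (n : Nat) (rows : List (List Int)) (c : List Int) : List Int :=
  (List.range n).map (fun i => PySem.Int.mod (sumProd (rows.map (fun row => row.getD i 0)) c) 2)

theorem getD_range_map {α : Type} (h : Nat → α) (d : α) {n i : Nat} (hi : i < n) :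
    ((List.range n).map h).getD i d = h i := by
  simp [List.getD, hi]

theorem mod_add_mod2 (a b : Int) :
    PySem.Int.mod (b + PySem.Int.mod a 2) 2 = PySem.Int.mod (b + a) 2 := by
  have h2 : (0:Int) < 2 := by norm_num
  simp only [PySem.Int.mod_eq_emod_of_pos h2]
  omega

-- B's doubling fold produces exactly the reference values in product order
theorem altFold_eq (n : Nat) (rows : List (List Int)) :
    rows.reverse.foldl (fun combos v => combos ++ combos.map (fun r => xorRow n v r))
      [List.replicate n 0]
      = (pyProduct2 rows.length).map (refVal n rows) := by
  induction rows with
  | nil =>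
      simp [pyProduct2, refVal, sumProd, PySem.Int.mod]
  | cons v rest ih =>
      rw [List.reverse_cons, List.foldl_concat, ih]
      simp only [pyProduct2, List.length_cons, List.map_append, List.map_map]
      congr 1
      · apply List.map_congr_left
        intro c hc
        simp only [Function.comp_apply, refVal]
        apply List.map_congr_left
        intro i hi
        simp [sumProd]
      · apply List.map_congr_left
        intro c hc
        show xorRow n v (refVal n rest c) = refVal n (v :: rest) (1 :: c)
        unfold refVal xorRow
        apply List.map_congr_left
        intro i hi
        simp only [List.mem_range] at hi
        rw [getD_range_map _ _ hi]
        simp only [List.map_cons, sumProd, mul_one]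
        rw [add_comm (PySem.Int.mod _ 2), mod_add_mod2]

-- under Pre_, the minimum row length is the first row's length
theorem foldl_min_len (rows : List (List Int)) (n : Nat)
    (h : ∀ r ∈ rows, n ≤ r.length) :
    rows.foldl (fun acc r => min acc r.length) n = n := by
  induction rows with
  | nil => rfl
  | cons r rest ih =>
      simp only [List.foldl_cons]
      rw [Nat.min_eq_left (h r (by simp))]
      exact ih (fun r hr => h r (List.mem_cons_of_mem _ hr))

-- ===== VERDICT (by name: the statement is the Claim_ definition above) =====
theorem span_generator_mod2_spec : Claim_equal_span_generator_mod2 := by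
  intro liste _ hpre
  unfold Spec_span_generator_mod2
  match liste with
  | [] => rfl
  | first :: rest =>
      unfold span_generator_mod2 span_generator_mod2_alt
      simp only [if_neg (by simp : ¬ (first :: rest = []))]
      rw [altFold_eq]
      apply List.map_congr_left
      intro c hc
      unfold refVal
      apply List.map_congr_left
      intro i hi
      simp only [List.mem_range] at hi
      congr 2
      unfold pyTranspose
      have hmin : (first :: rest).foldl (fun acc r => min acc r.length)
          ((first :: rest).headD []).length = ((first :: rest).headD []).length :=
        foldl_min_len _ _ (fun r hr => hpre r hr)
      rw [hmin]
      exact getD_range_map _ _ hi
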